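-- pv_equiv track=rewrite | github.com/hungtxyz/Genetic-CNN | model/decoder.py | phase_decode
-- ===== SOURCE A (Python) =====
-- def phase_decode(binary_array):
--     i = 0
--     res = []
--     sub = []
--     leng = 1
--     count = 0
--     while i < len(binary_array):
--         if count < leng:
--             sub.append(binary_array[i])
--             i += 1
--             count += 1
--         else:
--             res.append(sub)
--             leng += 1
--             count = 1
--             sub = []
--             sub.append(binary_array[i])
--             i += 1
--     res.append(sub)
--     return res
-- ===== SOURCE B (Python) =====
-- def phase_decode(binary_array):
--     def go(rest, size):
--         if len(rest) <= size:
--             return [rest]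
--         return [rest[:size]] + go(rest[size:], size + 1)
--     return go(binary_array, 1)
-- ===== Notes on version B (the rewrite author's own statement) =====
-- stated objective: simpler
-- what changed: Replaces the index/counter while-loop that appends element by element with a short recursion that slices off whole groups of growing size (each slice copies, so B trades a bit of speed for clarity).
import Mathlib
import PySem

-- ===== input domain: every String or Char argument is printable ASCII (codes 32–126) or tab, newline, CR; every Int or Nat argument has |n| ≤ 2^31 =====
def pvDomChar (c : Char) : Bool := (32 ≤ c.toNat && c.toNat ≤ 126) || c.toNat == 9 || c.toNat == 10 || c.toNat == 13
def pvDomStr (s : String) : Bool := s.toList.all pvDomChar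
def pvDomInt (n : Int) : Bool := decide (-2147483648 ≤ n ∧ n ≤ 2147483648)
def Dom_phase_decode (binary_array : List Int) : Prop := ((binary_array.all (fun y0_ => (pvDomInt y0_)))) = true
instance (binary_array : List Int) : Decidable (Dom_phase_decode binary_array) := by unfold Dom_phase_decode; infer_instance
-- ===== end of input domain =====

-- B splits the array into groups of growing size 1,2,3,… by slicing recursion instead of A's
-- index/counter while-loop; same return value, structure chosen for clarity (no speed claim).

-- ===== PORT A =====
-- the while-loop of A, state (i, res, sub, leng, count); i always indexes in range
def phaseLoopA (ba : List Int) (i : Nat) (res : List (List Int)) (sub : List Int)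
    (leng count : Nat) : List (List Int) :=
  if h : i < ba.length then
    if count < leng then
      phaseLoopA ba (i + 1) res (sub ++ [ba[i]]) leng (count + 1)
    else
      phaseLoopA ba (i + 1) (res ++ [sub]) ([] ++ [ba[i]]) (leng + 1) 1
  else
    res ++ [sub]
termination_by ba.length - i
decreasing_by all_goals omega

def phase_decode (binary_array : List Int) : List (List Int) :=
  phaseLoopA binary_array 0 [] [] 1 0

-- ===== PORT B =====
def phaseGo (rest : List Int) (size : Nat) : List (List Int) :=
  if rest.length ≤ size then [rest]
  else rest.take size :: phaseGo (rest.drop size) (size + 1)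
termination_by 2 * rest.length - size
decreasing_by simp only [List.length_drop]; omega

def phase_decode_alt (binary_array : List Int) : List (List Int) :=
  phaseGo binary_array 1

-- ===== PRECONDITION & SPEC =====
def Spec_phase_decode (binary_array : List Int) (out : List (List Int)) : Prop := out = phase_decode_alt binary_array
instance (binary_array : List Int) (out : List (List Int)) : Decidable (Spec_phase_decode binary_array out) := by unfold Spec_phase_decode; infer_instance

-- ===== CLAIM (what is proved, stated in full; the proofs are below) =====
def Claim_equal_phase_decode : Prop := ∀ (binary_array : List Int), Dom_phase_decode binary_array → Spec_phase_decode binary_array (phase_decode binary_array)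

-- ===== LEMMAS AND PROOFS =====

-- A's loop rewritten over the suffix list instead of an index
def phaseLoopL : List Int → List (List Int) → List Int → Nat → Nat → List (List Int)
  | [], res, sub, _, _ => res ++ [sub]
  | x :: rest, res, sub, leng, count =>
    if count < leng then phaseLoopL rest res (sub ++ [x]) leng (count + 1)
    else phaseLoopL rest (res ++ [sub]) ([] ++ [x]) (leng + 1) 1

theorem phaseLoopA_eq_L (ba : List Int) (i : Nat) (res : List (List Int)) (sub : List Int)
    (leng count : Nat) :
    phaseLoopA ba i res sub leng count = phaseLoopL (ba.drop i) res sub leng count := by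
  induction i, res, sub, leng, count using phaseLoopA.induct ba with
  | case1 i res sub leng count h hc ih =>
    rw [phaseLoopA, List.drop_eq_getElem_cons h]
    simp only [h, hc, dif_pos, if_pos, phaseLoopL, ih]
  | case2 i res sub leng count h hc ih =>
    rw [phaseLoopA, List.drop_eq_getElem_cons h]
    simp only [phaseLoopL, h, hc, dif_pos]
    simpa using ih
  | case3 i res sub leng count h =>
    rw [phaseLoopA, List.drop_eq_nil_of_le (by omega)]
    simp [h, phaseLoopL]

-- filling the current group: with k = leng - count slots left and sub the partial group,
-- the loop either finishes on a short rest or emits the filled group and restarts fresh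
theorem phaseLoopL_fill (k : Nat) : ∀ (rest : List Int) (res : List (List Int)) (sub : List Int)
    (leng count : Nat), count + k = leng → count = sub.length →
    phaseLoopL rest res sub leng count =
      if rest.length ≤ k then res ++ [sub ++ rest]
      else phaseLoopL (rest.drop k) (res ++ [sub ++ rest.take k]) [] (leng + 1) 0 := by
  induction k with
  | zero =>
    intro rest res sub leng count hk hc
    cases rest with
    | nil => simp [phaseLoopL]
    | cons x r =>
      have hnc : ¬ count < leng := by omega
      rw [if_neg (by simp)]
      simp only [List.drop_zero, List.take_zero, List.append_nil]
      conv_lhs => rw [phaseLoopL]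
      rw [if_neg hnc]
      conv_rhs => rw [phaseLoopL]
      rw [if_pos (by omega)]
  | succ k ih =>
    intro rest res sub leng count hk hc
    cases rest with
    | nil => simp [phaseLoopL]
    | cons x r =>
      have : count < leng := by omega
      simp only [phaseLoopL, this, if_pos]
      rw [ih r res (sub ++ [x]) leng (count + 1) (by omega) (by simp [hc])]
      simp only [List.length_cons, List.drop_succ_cons, List.take_succ_cons,
        List.append_assoc, List.singleton_append]
      by_cases hle : r.length ≤ k
      · rw [if_pos hle, if_pos (by omega)]
      · rw [if_neg hle, if_neg (by omega)]

-- from a fresh group onward the loop computes exactly B's recursion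
theorem phaseLoopL_eq_go (rest : List Int) (leng : Nat) (hl : 1 ≤ leng) :
    ∀ (res : List (List Int)), phaseLoopL rest res [] leng 0 = res ++ phaseGo rest leng := by
  induction rest, leng using phaseGo.induct with
  | case1 rest leng hle =>
    intro res
    rw [phaseLoopL_fill leng rest res [] leng 0 (by omega) rfl, if_pos hle,
      phaseGo, if_pos hle]
    simp
  | case2 rest leng hle ih =>
    intro res
    rw [phaseLoopL_fill leng rest res [] leng 0 (by omega) rfl, if_neg hle, ih (by omega)]
    conv_rhs => rw [phaseGo]
    rw [if_neg hle]
    simp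

-- ===== VERDICT (by name: the statement is the Claim_ definition above) =====
theorem phase_decode_spec : Claim_equal_phase_decode := by
  intro ba _
  show phase_decode ba = phase_decode_alt ba
  rw [phase_decode, phase_decode_alt, phaseLoopA_eq_L, List.drop_zero,
    phaseLoopL_eq_go ba 1 (by omega) []]
  simp
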